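-- pv_equiv track=rewrite | github.com/UMassCDS/Career-Path-Analysis | code/explore/timelines.py | check_overlaps
-- ===== SOURCE A (Python) =====
-- def check_overlaps(timeline1, timeline2, exclude_dups=False):
--     companies1 = set([ d for s, e, d in timeline1 ])
--     companies2 = set([ d for s, e, d in timeline2 ])
--     if exclude_dups and (companies1 == companies2):
--         return None
--     common = companies1.intersection(companies2)
--     overlaps = []
--     if len(common) > 0:
--         for s1, e1, d1 in [ (s, e, d) for s, e, d in timeline1 if (d in common) ]:
--             for s2, e2, d2 in [(s, e, d) for s, e, d in timeline2 if (d == d1)]: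
--                 if (s2 < e1) and (s1 < e2):
--                     overlaps.append(d1)
--     return set(overlaps)
-- ===== SOURCE B (Python) =====
-- def check_overlaps(timeline1, timeline2, exclude_dups=False):
--     companies1 = set(d for s, e, d in timeline1)
--     companies2 = set(d for s, e, d in timeline2)
--     if exclude_dups and companies1 == companies2:
--         return None
--     index = {}
--     for s, e, d in timeline2:
--         index.setdefault(d, []).append((s, e))
--     result = set()
--     for s1, e1, d1 in timeline1:
--         if any(s2 < e1 and s1 < e2 for s2, e2 in index.get(d1, ())):
--             result.add(d1)
--     return result
-- ===== Notes on version B (the rewrite author's own statement) =====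
-- stated objective: faster
-- what changed: B builds a dict indexing timeline2's intervals by company once, then makes a single pass over timeline1 checking only the matching company's intervals, instead of A's per-entry full filters of timeline2 (and its recomputed common-set filter of timeline1).
import Mathlib
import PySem

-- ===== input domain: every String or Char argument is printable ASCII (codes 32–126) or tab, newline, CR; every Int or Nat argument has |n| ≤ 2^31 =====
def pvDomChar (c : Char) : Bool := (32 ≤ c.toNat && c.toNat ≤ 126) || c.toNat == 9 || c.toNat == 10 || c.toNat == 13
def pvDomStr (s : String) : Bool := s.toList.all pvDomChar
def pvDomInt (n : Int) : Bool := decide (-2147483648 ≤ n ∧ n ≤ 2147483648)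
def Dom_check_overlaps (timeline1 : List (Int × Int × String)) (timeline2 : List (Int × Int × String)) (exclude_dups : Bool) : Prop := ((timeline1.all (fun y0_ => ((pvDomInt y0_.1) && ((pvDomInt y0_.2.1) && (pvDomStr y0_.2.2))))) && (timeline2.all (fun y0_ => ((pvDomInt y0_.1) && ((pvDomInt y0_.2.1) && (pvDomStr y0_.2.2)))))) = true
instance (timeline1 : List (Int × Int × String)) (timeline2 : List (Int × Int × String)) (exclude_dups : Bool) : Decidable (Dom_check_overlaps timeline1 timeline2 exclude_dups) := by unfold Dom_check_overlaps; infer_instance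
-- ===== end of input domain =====

-- B replaces A's per-entry filters over all of timeline2 by a dict index of timeline2's intervals by company built once, then a single pass over timeline1 (objective: faster).

-- ===== PORT A =====
def check_overlaps (timeline1 : List (Int × Int × String)) (timeline2 : List (Int × Int × String)) (exclude_dups : Bool) : Option (List String) :=
  let companies1 : PySem.Set String := PySem.Set.ofList (timeline1.map (fun p => p.2.2))
  let companies2 : PySem.Set String := PySem.Set.ofList (timeline2.map (fun p => p.2.2))
  if exclude_dups && PySem.Set.equal companies1 companies2 then none
  else
    let common : PySem.Set String := PySem.Set.inter companies1 companies2
    let overlaps : List String :=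
      if PySem.Set.len common > 0 then
        (timeline1.filter (fun p => PySem.Set.contains common p.2.2)).foldl
          (fun acc p1 =>
            (timeline2.filter (fun q => q.2.2 == p1.2.2)).foldl
              (fun acc2 p2 =>
                if p2.1 < p1.2.1 && p1.1 < p2.2.1 then acc2 ++ [p1.2.2] else acc2)
              acc)
          []
      else []
    some (PySem.Set.ofList overlaps)

-- ===== PORT B =====
def check_overlaps_alt (timeline1 : List (Int × Int × String)) (timeline2 : List (Int × Int × String)) (exclude_dups : Bool) : Option (List String) :=
  let companies1 : PySem.Set String := PySem.Set.ofList (timeline1.map (fun p => p.2.2))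
  let companies2 : PySem.Set String := PySem.Set.ofList (timeline2.map (fun p => p.2.2))
  if exclude_dups && PySem.Set.equal companies1 companies2 then none
  else
    let index : PySem.Dict String (List (Int × Int)) :=
      timeline2.foldl (fun d p => d.modify p.2.2 [] (fun l => l ++ [(p.1, p.2.1)])) PySem.Dict.empty
    some (timeline1.foldl
      (fun s p1 =>
        if (index.getD p1.2.2 []).any (fun q => q.1 < p1.2.1 && p1.1 < q.2) then
          PySem.Set.add s p1.2.2
        else s)
      PySem.Set.empty)

-- ===== PRECONDITION & SPEC =====
def Spec_check_overlaps (timeline1 : List (Int × Int × String)) (timeline2 : List (Int × Int × String)) (exclude_dups : Bool) (out : Option (List String)) : Prop := out = check_overlaps_alt timeline1 timeline2 exclude_dups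
instance (timeline1 : List (Int × Int × String)) (timeline2 : List (Int × Int × String)) (exclude_dups : Bool) (out : Option (List String)) : Decidable (Spec_check_overlaps timeline1 timeline2 exclude_dups out) := by unfold Spec_check_overlaps; infer_instance

-- ===== CLAIM (what is proved, stated in full; the proofs are below) =====
def Claim_equal_check_overlaps : Prop := ∀ (timeline1 : List (Int × Int × String)) (timeline2 : List (Int × Int × String)) (exclude_dups : Bool), Dom_check_overlaps timeline1 timeline2 exclude_dups → Spec_check_overlaps timeline1 timeline2 exclude_dups (check_overlaps timeline1 timeline2 exclude_dups)

-- ===== LEMMAS AND PROOFS =====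

-- updating a set with copies of one element x adds x once (if any copy exists)
theorem pv_update_const (x : String) : ∀ (l : List (Int × Int × String)) (s : PySem.Set String),
    PySem.Set.update s (l.map (fun _ => x)) = if l = [] then s else PySem.Set.add s x := by
  intro l
  induction l with
  | nil => intro s; simp [PySem.Set.update_nil]
  | cons a t ih =>
      intro s
      simp only [List.map_cons, PySem.Set.update_cons, ih]
      have hx : x ∈ PySem.Set.add s x := by
        rw [PySem.Set.mem_add]; right; rfl
      by_cases ht : t = [] <;>
        simp [ht, PySem.Set.add_of_mem, hx]

-- set(...) of an append-accumulating fold is the fold of set updates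
theorem pv_ofList_foldl_append (g : (Int × Int × String) → List String) :
    ∀ (l : List (Int × Int × String)) (acc : List String),
    PySem.Set.ofList (l.foldl (fun a p => a ++ g p) acc)
      = l.foldl (fun s p => PySem.Set.update s (g p)) (PySem.Set.ofList acc) := by
  intro l
  induction l with
  | nil => intro acc; rfl
  | cons a t ih =>
      intro acc
      simp only [List.foldl_cons, ih, PySem.Set.ofList_append]

-- the core loop equivalence: A's filtered update loop = B's single pass, given the common-set facts
theorem pv_core (timeline2 : List (Int × Int × String)) (common : PySem.Set String)
    (cond : (Int × Int × String) → (Int × Int × String) → Bool) :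
    ∀ (t1 : List (Int × Int × String)),
    (∀ p ∈ t1, (p.2.2 ∈ common ↔ p.2.2 ∈ timeline2.map (fun q => q.2.2))) →
    ∀ (s0 : PySem.Set String),
    (t1.filter (fun p => PySem.Set.contains common p.2.2)).foldl
        (fun s p1 => PySem.Set.update s
          (((timeline2.filter (fun q => q.2.2 == p1.2.2)).filter (cond p1)).map (fun _ => p1.2.2))) s0
      = t1.foldl
        (fun s p1 => if (timeline2.filter (fun q => q.2.2 == p1.2.2)).any (cond p1) then
            PySem.Set.add s p1.2.2 else s) s0 := by
  intro t1
  induction t1 with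
  | nil => intro _ s0; rfl
  | cons a t ih =>
      intro h s0
      have ha := h a (by simp)
      have ht : ∀ p ∈ t, (p.2.2 ∈ common ↔ p.2.2 ∈ timeline2.map (fun q => q.2.2)) := by
        intro p hp; exact h p (List.mem_cons_of_mem _ hp)
      by_cases hc : a.2.2 ∈ common
      · -- a's company is in common: both sides process a
        have hcontains : PySem.Set.contains common a.2.2 = true :=
          (PySem.Set.contains_iff _ _).mpr hc
        simp only [List.filter_cons, hcontains, if_pos trivial, List.foldl_cons]
        rw [pv_update_const, ih ht]
        congr 1
        by_cases hany : (timeline2.filter (fun q => q.2.2 == a.2.2)).any (cond a) = true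
        · have hne : (timeline2.filter (fun q => q.2.2 == a.2.2)).filter (cond a) ≠ [] := by
            obtain ⟨x, hx, hcx⟩ := List.any_eq_true.mp hany
            intro hnil
            exact (List.filter_eq_nil_iff.mp hnil) x hx hcx
          rw [if_neg hne, if_pos hany]
        · have hnil : (timeline2.filter (fun q => q.2.2 == a.2.2)).filter (cond a) = [] := by
            rw [List.filter_eq_nil_iff]
            intro x hx hcx
            exact hany (List.any_eq_true.mpr ⟨x, hx, hcx⟩)
          rw [if_pos hnil, if_neg hany]
      · -- a's company not in common: no timeline2 entry matches, both sides skip a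
        have hcontains : PySem.Set.contains common a.2.2 = false := by
          rw [Bool.eq_false_iff]
          intro hcon
          exact hc ((PySem.Set.contains_iff _ _).mp hcon)
        have hfilter : timeline2.filter (fun q => q.2.2 == a.2.2) = [] := by
          rw [List.filter_eq_nil_iff]
          intro q hq hqe
          apply hc
          rw [ha]
          exact List.mem_map.mpr ⟨q, hq, beq_iff_eq.mp hqe⟩
        simp only [List.filter_cons, hcontains, List.foldl_cons, hfilter,
          List.any_nil, Bool.false_eq_true, if_false]
        exact ih ht s0

-- ===== VERDICT (by name: the statement is the Claim_ definition above) =====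
theorem check_overlaps_spec : Claim_equal_check_overlaps := by
  unfold Claim_equal_check_overlaps Spec_check_overlaps
  intro t1 t2 ex _
  unfold check_overlaps check_overlaps_alt
  by_cases hdup : (ex && PySem.Set.equal (PySem.Set.ofList (t1.map (fun p => p.2.2)))
      (PySem.Set.ofList (t2.map (fun p => p.2.2)))) = true
  · simp only [hdup, if_pos trivial]
  · simp only [Bool.not_eq_true] at hdup
    simp only [hdup, Bool.false_eq_true, if_false]
    congr 1
    -- rewrite B's dict lookup into a filter of timeline2
    have hidx : ∀ (c : String),
        (t2.foldl (fun d p => d.modify p.2.2 [] (fun l => l ++ [(p.1, p.2.1)]))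
            PySem.Dict.empty).getD c []
          = (t2.filter (fun q => q.2.2 == c)).map (fun q => (q.1, q.2.1)) := by
      intro c
      have := PySem.Dict.getD_foldl_modify_append
        (t2.map (fun p => (p.2.2, (p.1, p.2.1)))) (PySem.Dict.empty) c
      rw [List.foldl_map] at this
      simp only [this, PySem.Dict.getD_empty, List.nil_append, List.filter_map]
      rw [List.map_map]
      rfl
    have hB : (t1.foldl (fun s p1 =>
        if ((t2.foldl (fun d p => d.modify p.2.2 [] (fun l => l ++ [(p.1, p.2.1)]))
              PySem.Dict.empty).getD p1.2.2 []).any (fun q => q.1 < p1.2.1 && p1.1 < q.2) then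
          PySem.Set.add s p1.2.2 else s) PySem.Set.empty)
        = t1.foldl (fun s p1 =>
            if (t2.filter (fun q => q.2.2 == p1.2.2)).any
                (fun p2 => p2.1 < p1.2.1 && p1.1 < p2.2.1) then
              PySem.Set.add s p1.2.2 else s) PySem.Set.empty := by
      apply PySem.List.foldl_congr_mem
      intro s p1 _
      rw [hidx p1.2.2, List.any_map]
      rfl
    rw [hB]
    set common : PySem.Set String :=
      PySem.Set.inter (PySem.Set.ofList (t1.map (fun p => p.2.2)))
        (PySem.Set.ofList (t2.map (fun p => p.2.2))) with hcommon
    have hmem : ∀ p ∈ t1, (p.2.2 ∈ common ↔ p.2.2 ∈ t2.map (fun q => q.2.2)) := by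
      intro p hp
      rw [hcommon, PySem.Set.mem_inter, PySem.Set.mem_ofList, PySem.Set.mem_ofList]
      constructor
      · exact fun h => h.2
      · exact fun h => ⟨List.mem_map.mpr ⟨p, hp, rfl⟩, h⟩
    by_cases hlen : PySem.Set.len common > 0
    · simp only [hlen, if_pos trivial]
      have hfold : ∀ (p1 : Int × Int × String) (acc : List String),
          (t2.filter (fun q => q.2.2 == p1.2.2)).foldl
            (fun acc2 p2 => if p2.1 < p1.2.1 && p1.1 < p2.2.1 then acc2 ++ [p1.2.2] else acc2) acc
          = acc ++ ((t2.filter (fun q => q.2.2 == p1.2.2)).filter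
              (fun p2 => p2.1 < p1.2.1 && p1.1 < p2.2.1)).map (fun _ => p1.2.2) := by
        intro p1 acc
        exact PySem.List.foldl_append_if _ (fun _ => p1.2.2) _ acc
      calc PySem.Set.ofList ((t1.filter (fun p => PySem.Set.contains common p.2.2)).foldl
            (fun acc p1 => (t2.filter (fun q => q.2.2 == p1.2.2)).foldl
              (fun acc2 p2 => if p2.1 < p1.2.1 && p1.1 < p2.2.1 then acc2 ++ [p1.2.2] else acc2) acc) [])
          = PySem.Set.ofList ((t1.filter (fun p => PySem.Set.contains common p.2.2)).foldl
            (fun acc p1 => acc ++ ((t2.filter (fun q => q.2.2 == p1.2.2)).filter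
              (fun p2 => p2.1 < p1.2.1 && p1.1 < p2.2.1)).map (fun _ => p1.2.2)) []) := by
            congr 1
            apply PySem.List.foldl_congr_mem
            intro acc p1 _
            exact hfold p1 acc
        _ = _ := by
            rw [pv_ofList_foldl_append]
            exact pv_core t2 common (fun p1 p2 => p2.1 < p1.2.1 && p1.1 < p2.2.1) t1 hmem _
    · -- common is empty: A's overlaps list is [], and B's loop never fires
      rw [if_neg hlen]
      have hempty : common = [] := by
        rcases common with _ | ⟨c, cs⟩
        · rfl
        · exfalso; apply hlen
          simp [PySem.Set.len]
      rw [← pv_core t2 common (fun p1 p2 => p2.1 < p1.2.1 && p1.1 < p2.2.1) t1 hmem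
        PySem.Set.empty]
      have hfil : t1.filter (fun p => PySem.Set.contains common p.2.2) = [] := by
        rw [List.filter_eq_nil_iff]
        intro p _ hcon
        have := (PySem.Set.contains_iff _ _).mp hcon
        rw [hempty] at this
        simp at this
      rw [hfil]
      rfl
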